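-- pv_equiv track=rewrite | github.com/eunji1223/BOJ | 10단계. 재귀/3.2447.py | stars
-- ===== SOURCE A (Python) =====
-- def stars(num): #star list 입력
--     maps=[]
--     for i in range(3*len(num)):
--         if i//len(num)==1:
--             maps.append(num[i%len(num)]+" "*len(num)+num[i%len(num)])
--         else:
--             maps.append(num[i%len(num)]*3)
--     return(list(maps))
-- ===== SOURCE B (Python) =====
-- def stars(num):
--     n = len(num)
--     top = [line * 3 for line in num]
--     mid = [line + " " * n + line for line in num]
--     return top + mid + top
-- ===== Notes on version B (the rewrite author's own statement) =====
-- stated objective: simpler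
-- what changed: Replaces the single flat loop over range(3*len(num)) with its i//n branch and i%n index arithmetic by building the three horizontal blocks directly (top, middle, top) with two comprehensions over num and concatenating them.
import Mathlib
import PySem

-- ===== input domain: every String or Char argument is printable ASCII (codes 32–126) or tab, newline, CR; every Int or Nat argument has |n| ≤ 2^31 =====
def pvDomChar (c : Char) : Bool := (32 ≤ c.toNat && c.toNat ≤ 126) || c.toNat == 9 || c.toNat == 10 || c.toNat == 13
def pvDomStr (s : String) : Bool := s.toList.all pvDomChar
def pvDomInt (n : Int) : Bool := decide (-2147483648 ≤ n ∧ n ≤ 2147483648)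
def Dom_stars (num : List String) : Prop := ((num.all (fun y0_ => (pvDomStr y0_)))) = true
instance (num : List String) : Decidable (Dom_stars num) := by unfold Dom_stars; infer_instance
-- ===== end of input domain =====

-- B builds the three horizontal blocks (top, middle, top) directly instead of A's single flat loop with i//n branching and i%n indexing; same rows in the same order (objective: simpler).

-- ===== PORT A =====
def stars (num : List String) : List String :=
  (PySem.List.pyRange 0 (3 * (num.length : Int)) 1).foldl
    (fun maps i =>
      if PySem.Int.floordiv i (num.length : Int) = 1 then
        maps ++ [PySem.List.pyGetD num (PySem.Int.mod i (num.length : Int)) ""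
                  ++ String.ofList (List.replicate num.length ' ')
                  ++ PySem.List.pyGetD num (PySem.Int.mod i (num.length : Int)) ""]
      else
        maps ++ [PySem.List.pyGetD num (PySem.Int.mod i (num.length : Int)) ""
                  ++ PySem.List.pyGetD num (PySem.Int.mod i (num.length : Int)) ""
                  ++ PySem.List.pyGetD num (PySem.Int.mod i (num.length : Int)) ""])
    []

-- ===== PORT B =====
def stars_alt (num : List String) : List String :=
  let n := num.length
  let top := num.map (fun line => line ++ line ++ line)
  let mid := num.map (fun line => line ++ String.ofList (List.replicate n ' ') ++ line)
  top ++ mid ++ top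

-- ===== PRECONDITION & SPEC =====
def Spec_stars (num : List String) (out : List String) : Prop := out = stars_alt num
instance (num : List String) (out : List String) : Decidable (Spec_stars num out) := by unfold Spec_stars; infer_instance

-- ===== CLAIM (what is proved, stated in full; the proofs are below) =====
def Claim_equal_stars : Prop := ∀ (num : List String), Dom_stars num → Spec_stars num (stars num)

-- ===== LEMMAS AND PROOFS =====

theorem map_comp_range (num : List String) (g : String → String) :
    (List.range num.length).map (fun k => g (num.getD k "")) = num.map g := by
  apply List.ext_getElem
  · simp
  · intro i h1 h2
    have hi : i < num.length := by simpa using h2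
    simp [List.getD_eq_getElem?_getD, List.getElem?_eq_getElem hi]

theorem fd_add (k N m : Int) (h0 : 0 ≤ k) (h : k < N) :
    PySem.Int.floordiv (m * N + k) N = m := by
  rw [PySem.Int.floordiv_eq_ediv_of_pos (by omega)]
  rw [add_comm, Int.add_mul_ediv_right _ _ (by omega : N ≠ 0),
      Int.ediv_eq_zero_of_lt h0 h, zero_add]

theorem md_add (k N m : Int) (h0 : 0 ≤ k) (h : k < N) :
    PySem.Int.mod (m * N + k) N = k := by
  rw [PySem.Int.mod_eq_emod_of_pos (by omega)]
  rw [add_comm, Int.add_mul_emod_self_right, Int.emod_eq_of_lt h0 h]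

theorem stars_map_seg (num : List String) (m : Nat)
    (g : String → String)
    (hg : ∀ s : String,
      (if (m : Int) = 1 then
        s ++ String.ofList (List.replicate num.length ' ') ++ s
      else s ++ s ++ s) = g s) :
    (PySem.List.pyRange ((m : Int) * (num.length : Int))
        (((m : Int) + 1) * (num.length : Int)) 1).map
      (fun i =>
        if PySem.Int.floordiv i (num.length : Int) = 1 then
          PySem.List.pyGetD num (PySem.Int.mod i (num.length : Int)) ""
            ++ String.ofList (List.replicate num.length ' ')
            ++ PySem.List.pyGetD num (PySem.Int.mod i (num.length : Int)) ""
        else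
          PySem.List.pyGetD num (PySem.Int.mod i (num.length : Int)) ""
            ++ PySem.List.pyGetD num (PySem.Int.mod i (num.length : Int)) ""
            ++ PySem.List.pyGetD num (PySem.Int.mod i (num.length : Int)) "") =
    num.map g := by
  rw [PySem.List.pyRange_one]
  have hlen : (((m : Int) + 1) * (num.length : Int) - (m : Int) * (num.length : Int)).toNat
      = num.length := by
    have : ((m : Int) + 1) * (num.length : Int) - (m : Int) * (num.length : Int)
        = (num.length : Int) := by ring
    omega
  rw [hlen, List.map_map, ← map_comp_range num g]
  apply List.map_congr_left
  intro k hk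
  have hk' : (k : Int) < (num.length : Int) := by
    exact_mod_cast List.mem_range.mp hk
  have h1 : PySem.Int.floordiv ((m : Int) * (num.length : Int) + (k : Int))
      (num.length : Int) = (m : Int) := fd_add _ _ _ (by omega) hk'
  have h2 : PySem.Int.mod ((m : Int) * (num.length : Int) + (k : Int))
      (num.length : Int) = (k : Int) := md_add _ _ _ (by omega) hk'
  have := hg (num.getD k "")
  simp only [Function.comp_apply, h1, h2, PySem.List.pyGetD_natCast]
  split_ifs at this ⊢ with hc
  · exact this
  · exact this

theorem stars_spec_aux (num : List String) : stars num = stars_alt num := by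
  unfold stars stars_alt
  have hN : (0:Int) ≤ (num.length : Int) := Int.natCast_nonneg _
  have hfun : (fun (maps : List String) (i : Int) =>
      if PySem.Int.floordiv i (num.length : Int) = 1 then
        maps ++ [PySem.List.pyGetD num (PySem.Int.mod i (num.length : Int)) ""
                  ++ String.ofList (List.replicate num.length ' ')
                  ++ PySem.List.pyGetD num (PySem.Int.mod i (num.length : Int)) ""]
      else
        maps ++ [PySem.List.pyGetD num (PySem.Int.mod i (num.length : Int)) ""
                  ++ PySem.List.pyGetD num (PySem.Int.mod i (num.length : Int)) ""
                  ++ PySem.List.pyGetD num (PySem.Int.mod i (num.length : Int)) ""]) =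
      (fun maps i => maps ++
        [if PySem.Int.floordiv i (num.length : Int) = 1 then
          PySem.List.pyGetD num (PySem.Int.mod i (num.length : Int)) ""
            ++ String.ofList (List.replicate num.length ' ')
            ++ PySem.List.pyGetD num (PySem.Int.mod i (num.length : Int)) ""
        else
          PySem.List.pyGetD num (PySem.Int.mod i (num.length : Int)) ""
            ++ PySem.List.pyGetD num (PySem.Int.mod i (num.length : Int)) ""
            ++ PySem.List.pyGetD num (PySem.Int.mod i (num.length : Int)) ""]) := by
    funext maps i; split_ifs <;> rfl
  rw [hfun, PySem.List.foldl_append_singleton_eq_map, List.nil_append]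
  rw [PySem.List.pyRange_one_append 0 (num.length : Int) (3 * (num.length : Int))
        (by omega) (by omega),
      PySem.List.pyRange_one_append (num.length : Int) (2 * (num.length : Int))
        (3 * (num.length : Int)) (by omega) (by omega),
      List.map_append, List.map_append]
  have h0 := stars_map_seg num 0 (fun line => line ++ line ++ line) (by intro s; norm_num)
  have h1 := stars_map_seg num 1
      (fun line => line ++ String.ofList (List.replicate num.length ' ') ++ line) (by intro s; norm_num)
  have h2 := stars_map_seg num 2 (fun line => line ++ line ++ line) (by intro s; norm_num)
  norm_num at h0 h1 h2
  rw [h0, h1, h2]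
  simp [List.append_assoc]


-- ===== VERDICT (by name: the statement is the Claim_ definition above) =====
theorem stars_spec : Claim_equal_stars := by
  intro num _
  exact (stars_spec_aux num).symm ▸ rfl
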